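-- pv_equiv track=rewrite | github.com/assombrance/Quantomatic | src/q_functions.py | pre_permutation_edge_order_management
-- ===== SOURCE A (Python) =====
-- def pre_permutation_edge_order_management(start_nodes_order, edges, circuit_names, next_nodes_to_be_added_names):
--     """Returns the edges ordered by node (and more if some edges are not used)
--
--     Args:
--         start_nodes_order (list[node]): List of nodes before the permutation
--         edges (list[edge]): List of edges in the graph
--         circuit_names (list[string]): List on nodes' name in the current built circuit
--         next_nodes_to_be_added_names (list[string]): List of nodes to be added next (needed to determine the edges
--             coming out of the circuit but not used yet)
--
--     Returns:
--
--     """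
--     start_edges_order = []
--     for node in start_nodes_order:
--         for node_name in node:
--             for edge in edges:
--                 for edge_name in edge:
--                     if (node_name == edge[edge_name][0] and edge[edge_name][1] not in circuit_names) or \
--                             (node_name == edge[edge_name][1] and edge[edge_name][0] not in circuit_names):
--                         start_edges_order.append(edge)
--     for edge in edges:
--         for edge_name in edge:
--             if ((edge[edge_name][0] in circuit_names and
--                  edge[edge_name][1] not in circuit_names + next_nodes_to_be_added_names)
--                     or (edge[edge_name][1] in circuit_names and
--                         edge[edge_name][0] not in circuit_names + next_nodes_to_be_added_names)):
--                 start_edges_order.append(edge)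
--     return start_edges_order
-- ===== SOURCE B (Python) =====
-- def pre_permutation_edge_order_management(start_nodes_order, edges, circuit_names, next_nodes_to_be_added_names):
--     """Same result as A: one pass over the edges builds an index name -> matching
--     edge occurrences (and the unused-boundary tail), then one lookup per node name."""
--     circuit = set(circuit_names)
--     blocked = circuit | set(next_nodes_to_be_added_names)
--     by_name = {}
--     tail = []
--     for edge in edges:
--         for v in edge.values():
--             a, b = v[0], v[1]
--             if b not in circuit:
--                 by_name.setdefault(a, []).append(edge)
--             if a not in circuit and a != b:
--                 by_name.setdefault(b, []).append(edge)
--             if (a in circuit and b not in blocked) or (b in circuit and a not in blocked):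
--                 tail.append(edge)
--     out = []
--     for node in start_nodes_order:
--         for node_name in node:
--             out.extend(by_name.get(node_name, ()))
--     out.extend(tail)
--     return out
-- ===== Notes on version B (the rewrite author's own statement) =====
-- stated objective: faster
-- what changed: Replaces the quadruple nested scan (every node name rescans all edges and all their entries, with list membership tests) by a single pass over the edges that builds a hash index from endpoint name to matching edge occurrences plus the boundary tail, using sets for circuit membership; the output is then one index lookup per node name.
import Mathlib
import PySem

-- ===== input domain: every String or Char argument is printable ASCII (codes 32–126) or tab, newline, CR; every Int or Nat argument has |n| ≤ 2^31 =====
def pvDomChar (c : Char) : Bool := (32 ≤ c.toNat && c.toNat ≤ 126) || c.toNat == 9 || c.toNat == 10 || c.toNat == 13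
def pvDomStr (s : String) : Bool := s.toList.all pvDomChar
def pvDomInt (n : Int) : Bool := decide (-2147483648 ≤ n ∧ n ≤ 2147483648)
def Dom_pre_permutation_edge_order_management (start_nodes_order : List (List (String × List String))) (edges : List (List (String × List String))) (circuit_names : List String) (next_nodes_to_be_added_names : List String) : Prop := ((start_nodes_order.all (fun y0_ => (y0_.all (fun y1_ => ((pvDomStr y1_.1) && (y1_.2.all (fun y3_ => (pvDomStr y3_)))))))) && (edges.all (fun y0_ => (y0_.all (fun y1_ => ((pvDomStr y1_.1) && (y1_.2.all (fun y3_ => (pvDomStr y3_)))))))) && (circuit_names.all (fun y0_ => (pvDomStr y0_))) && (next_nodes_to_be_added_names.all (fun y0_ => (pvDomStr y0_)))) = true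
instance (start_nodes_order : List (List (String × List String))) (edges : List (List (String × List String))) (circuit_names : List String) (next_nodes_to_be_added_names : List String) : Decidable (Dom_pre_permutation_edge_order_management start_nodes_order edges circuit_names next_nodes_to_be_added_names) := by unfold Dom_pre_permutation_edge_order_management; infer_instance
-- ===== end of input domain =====

-- B replaces A's quadruple nested scan by one pass over the edges that builds an index
-- from endpoint name to matching edge occurrences (plus the boundary tail), then one
-- lookup per node name; equivalence is proved on Pre_ (dict-valid edges, endpoint lists of length >= 2).

-- ===== PORT A =====
-- Literal transliteration of A: four nested loops, then the boundary loop.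
-- edge[edge_name] is a dict lookup (always succeeds: edge_name ranges over edge's keys);
-- v[0] / v[1] raise IndexError when the value list is shorter than 2 — those inputs are
-- excluded by Pre_; pyGetD's default is never reached inside Pre_.
def pre_permutation_edge_order_management (start_nodes_order : List (List (String × List String))) (edges : List (List (String × List String))) (circuit_names : List String) (next_nodes_to_be_added_names : List String) : List (List (String × List String)) :=
  let start_edges_order : List (List (String × List String)) :=
    start_nodes_order.foldl (fun acc node =>
      node.foldl (fun acc p =>
        edges.foldl (fun acc edge =>
          edge.foldl (fun acc q =>
            let v := (PySem.Dict.mk edge).getD q.1 []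
            if ((p.1 == PySem.List.pyGetD v 0 "") && !(circuit_names.contains (PySem.List.pyGetD v 1 ""))) ||
               ((p.1 == PySem.List.pyGetD v 1 "") && !(circuit_names.contains (PySem.List.pyGetD v 0 "")))
            then acc ++ [edge] else acc) acc) acc) acc) []
  edges.foldl (fun acc edge =>
    edge.foldl (fun acc q =>
      let v := (PySem.Dict.mk edge).getD q.1 []
      if ((circuit_names.contains (PySem.List.pyGetD v 0 "") &&
            !((circuit_names ++ next_nodes_to_be_added_names).contains (PySem.List.pyGetD v 1 ""))) ||
          (circuit_names.contains (PySem.List.pyGetD v 1 "") &&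
            !((circuit_names ++ next_nodes_to_be_added_names).contains (PySem.List.pyGetD v 0 ""))))
      then acc ++ [edge] else acc) acc) start_edges_order

-- ===== PORT B =====
-- One entry of B's single pass: conditionally file `edge` under its endpoints in the
-- index and append it to the boundary tail (transliteration of Source B's inner loop body).
def ppBStep (circuit blocked : PySem.Set String) (edge : List (String × List String))
    (st : PySem.Dict String (List (List (String × List String))) × List (List (String × List String)))
    (q : String × List String) :
    PySem.Dict String (List (List (String × List String))) × List (List (String × List String)) :=
  let a := PySem.List.pyGetD q.2 0 ""
  let b := PySem.List.pyGetD q.2 1 ""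
  let d1 := if !(PySem.Set.contains circuit b) then st.1.modify a [] (fun l => l ++ [edge]) else st.1
  let d2 := if !(PySem.Set.contains circuit a) && !(a == b) then d1.modify b [] (fun l => l ++ [edge]) else d1
  let t := if (PySem.Set.contains circuit a && !(PySem.Set.contains blocked b)) ||
              (PySem.Set.contains circuit b && !(PySem.Set.contains blocked a))
           then st.2 ++ [edge] else st.2
  (d2, t)

def pre_permutation_edge_order_management_alt (start_nodes_order : List (List (String × List String))) (edges : List (List (String × List String))) (circuit_names : List String) (next_nodes_to_be_added_names : List String) : List (List (String × List String)) :=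
  let circuit := PySem.Set.ofList circuit_names
  let blocked := PySem.Set.union circuit (PySem.Set.ofList next_nodes_to_be_added_names)
  let st := edges.foldl (fun st edge => edge.foldl (ppBStep circuit blocked edge) st)
              ((PySem.Dict.empty : PySem.Dict String (List (List (String × List String)))), [])
  let out := start_nodes_order.foldl (fun acc node =>
    node.foldl (fun acc p => acc ++ st.1.getD p.1 []) acc) []
  out ++ st.2

-- ===== PRECONDITION & SPEC =====
-- Pre_ excludes edge association lists with duplicate keys (they cannot arise from a
-- Python dict, whose keys are unique) and edge values shorter than 2 entries, on which
-- the Python A raises IndexError.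
def Pre_pre_permutation_edge_order_management (_start_nodes_order : List (List (String × List String))) (edges : List (List (String × List String))) (_circuit_names : List String) (_next_nodes_to_be_added_names : List String) : Prop :=
  ∀ edge ∈ edges, (edge.map Prod.fst).Nodup ∧ ∀ q ∈ edge, 2 ≤ q.2.length
instance (start_nodes_order : List (List (String × List String))) (edges : List (List (String × List String))) (circuit_names : List String) (next_nodes_to_be_added_names : List String) : Decidable (Pre_pre_permutation_edge_order_management start_nodes_order edges circuit_names next_nodes_to_be_added_names) := by unfold Pre_pre_permutation_edge_order_management; infer_instance

def pvWitness_pre_permutation_edge_order_management : (List (List (String × List String))) × (List (List (String × List String))) × List String × List String :=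
  ([[("n1", [])], [("n2", [])]],
   [[("e0", ["n1", "n2"])], [("e1", ["n2", "n3"])]],
   ["n3"], ["n1"])

def Spec_pre_permutation_edge_order_management (start_nodes_order : List (List (String × List String))) (edges : List (List (String × List String))) (circuit_names : List String) (next_nodes_to_be_added_names : List String) (out : List (List (String × List String))) : Prop := out = pre_permutation_edge_order_management_alt start_nodes_order edges circuit_names next_nodes_to_be_added_names
instance (start_nodes_order : List (List (String × List String))) (edges : List (List (String × List String))) (circuit_names : List String) (next_nodes_to_be_added_names : List String) (out : List (List (String × List String))) : Decidable (Spec_pre_permutation_edge_order_management start_nodes_order edges circuit_names next_nodes_to_be_added_names out) := by unfold Spec_pre_permutation_edge_order_management; infer_instance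

-- ===== CLAIM (what is proved, stated in full; the proofs are below) =====
def Claim_equal_pre_permutation_edge_order_management : Prop := ∀ (start_nodes_order : List (List (String × List String))) (edges : List (List (String × List String))) (circuit_names : List String) (next_nodes_to_be_added_names : List String), Dom_pre_permutation_edge_order_management start_nodes_order edges circuit_names next_nodes_to_be_added_names → Pre_pre_permutation_edge_order_management start_nodes_order edges circuit_names next_nodes_to_be_added_names → Spec_pre_permutation_edge_order_management start_nodes_order edges circuit_names next_nodes_to_be_added_names (pre_permutation_edge_order_management start_nodes_order edges circuit_names next_nodes_to_be_added_names)

-- ===== LEMMAS AND PROOFS =====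

-- endpoints of an edge entry
def ppV0 (q : String × List String) : String := PySem.List.pyGetD q.2 0 ""
def ppV1 (q : String × List String) : String := PySem.List.pyGetD q.2 1 ""

-- A's first-loop condition, with the dict lookup already resolved to the entry's value
def ppCondA (cn : List String) (k : String) (q : String × List String) : Bool :=
  ((k == ppV0 q) && !(cn.contains (ppV1 q))) || ((k == ppV1 q) && !(cn.contains (ppV0 q)))

-- B's indexing condition: `edge` is filed under k at entry q
def ppCondB (circuit : PySem.Set String) (k : String) (q : String × List String) : Bool :=
  ((k == ppV0 q) && !(PySem.Set.contains circuit (ppV1 q))) ||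
  ((k == ppV1 q) && !(PySem.Set.contains circuit (ppV0 q)) && !(ppV0 q == ppV1 q))

-- A's second-loop condition
def ppCondT (cn nn : List String) (q : String × List String) : Bool :=
  (cn.contains (ppV0 q) && !((cn ++ nn).contains (ppV1 q))) ||
  (cn.contains (ppV1 q) && !((cn ++ nn).contains (ppV0 q)))

-- B's tail condition
def ppCondTB (circuit blocked : PySem.Set String) (q : String × List String) : Bool :=
  (PySem.Set.contains circuit (ppV0 q) && !(PySem.Set.contains blocked (ppV1 q))) ||
  (PySem.Set.contains circuit (ppV1 q) && !(PySem.Set.contains blocked (ppV0 q)))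

def ppOcc (c : String × List String → Bool) (edges : List (List (String × List String))) :
    List (List (String × List String)) :=
  edges.flatMap (fun edge => (edge.filter c).map (fun _ => edge))

theorem ppSet_contains_ofList (cn : List String) (x : String) :
    PySem.Set.contains (PySem.Set.ofList cn) x = cn.contains x := by
  rw [Bool.eq_iff_iff]
  rw [PySem.Set.contains_iff]
  rw [PySem.Set.mem_ofList]
  exact (List.contains_iff_mem).symm

theorem ppSet_contains_blocked (cn nn : List String) (x : String) :
    PySem.Set.contains (PySem.Set.union (PySem.Set.ofList cn) (PySem.Set.ofList nn)) x
      = (cn ++ nn).contains x := by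
  rw [Bool.eq_iff_iff]
  rw [PySem.Set.contains_iff]
  rw [PySem.Set.mem_union, PySem.Set.mem_ofList, PySem.Set.mem_ofList]
  simp

theorem ppCondB_eq (cn : List String) (k : String) (q : String × List String) :
    ppCondB (PySem.Set.ofList cn) k q = ppCondA cn k q := by
  unfold ppCondB ppCondA
  rw [ppSet_contains_ofList, ppSet_contains_ofList]
  by_cases h : ppV0 q = ppV1 q
  · rw [h]; cases hk : (k == ppV1 q) <;> cases hc : (cn.contains (ppV1 q)) <;> simp_all
  · have : (ppV0 q == ppV1 q) = false := by simp [h]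
    rw [this]; simp

theorem ppCondTB_eq (cn nn : List String) (q : String × List String) :
    ppCondTB (PySem.Set.ofList cn) (PySem.Set.union (PySem.Set.ofList cn) (PySem.Set.ofList nn)) q
      = ppCondT cn nn q := by
  unfold ppCondTB ppCondT
  rw [ppSet_contains_ofList, ppSet_contains_ofList, ppSet_contains_blocked, ppSet_contains_blocked]

-- ---- A-side characterisation ----

theorem ppA_edge_fold (cn : List String) (k : String) (edge : List (String × List String))
    (hnd : (edge.map Prod.fst).Nodup) (acc : List (List (String × List String))) :
    edge.foldl (fun acc q =>
        let v := (PySem.Dict.mk edge).getD q.1 []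
        if ((k == PySem.List.pyGetD v 0 "") && !(cn.contains (PySem.List.pyGetD v 1 ""))) ||
           ((k == PySem.List.pyGetD v 1 "") && !(cn.contains (PySem.List.pyGetD v 0 "")))
        then acc ++ [edge] else acc) acc
      = acc ++ (edge.filter (ppCondA cn k)).map (fun _ => edge) := by
  rw [PySem.List.foldl_congr_mem _ _
      (fun acc q => if ppCondA cn k q then acc ++ [edge] else acc) acc ?_]
  · exact PySem.List.foldl_append_if (ppCondA cn k) (fun _ => edge) edge acc
  · intro acc q hq
    have hv : (PySem.Dict.mk edge).getD q.1 [] = q.2 := by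
      refine PySem.Dict.getD_of_mem_items (PySem.Dict.mk edge) ?_ ?_ []
      · exact hq
      · exact hnd
    simp only [hv]
    rfl

theorem ppA_edges_fold (cn : List String) (k : String) (edges : List (List (String × List String)))
    (h : ∀ edge ∈ edges, (edge.map Prod.fst).Nodup) (acc : List (List (String × List String))) :
    edges.foldl (fun acc edge =>
        edge.foldl (fun acc q =>
          let v := (PySem.Dict.mk edge).getD q.1 []
          if ((k == PySem.List.pyGetD v 0 "") && !(cn.contains (PySem.List.pyGetD v 1 ""))) ||
             ((k == PySem.List.pyGetD v 1 "") && !(cn.contains (PySem.List.pyGetD v 0 "")))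
          then acc ++ [edge] else acc) acc) acc
      = acc ++ ppOcc (ppCondA cn k) edges := by
  rw [PySem.List.foldl_congr_mem _ _
      (fun acc edge => acc ++ (edge.filter (ppCondA cn k)).map (fun _ => edge)) acc ?_]
  · exact PySem.List.foldl_append_eq_flatMap _ edges acc
  · intro acc edge he
    exact ppA_edge_fold cn k edge (h edge he) acc

theorem ppA_tail_fold (cn nn : List String) (edges : List (List (String × List String)))
    (h : ∀ edge ∈ edges, (edge.map Prod.fst).Nodup) (acc : List (List (String × List String))) :
    edges.foldl (fun acc edge =>
        edge.foldl (fun acc q =>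
          let v := (PySem.Dict.mk edge).getD q.1 []
          if ((cn.contains (PySem.List.pyGetD v 0 "") && !((cn ++ nn).contains (PySem.List.pyGetD v 1 ""))) ||
              (cn.contains (PySem.List.pyGetD v 1 "") && !((cn ++ nn).contains (PySem.List.pyGetD v 0 ""))))
          then acc ++ [edge] else acc) acc) acc
      = acc ++ ppOcc (ppCondT cn nn) edges := by
  rw [PySem.List.foldl_congr_mem _ _
      (fun acc edge => acc ++ (edge.filter (ppCondT cn nn)).map (fun _ => edge)) acc ?_]
  · exact PySem.List.foldl_append_eq_flatMap _ edges acc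
  · intro acc edge he
    rw [PySem.List.foldl_congr_mem _ _
        (fun acc q => if ppCondT cn nn q then acc ++ [edge] else acc) acc ?_]
    · exact PySem.List.foldl_append_if (ppCondT cn nn) (fun _ => edge) edge acc
    · intro acc q hq
      have hv : (PySem.Dict.mk edge).getD q.1 [] = q.2 :=
        PySem.Dict.getD_of_mem_items (PySem.Dict.mk edge) hq (h edge he) []
      simp only [hv]
      rfl

theorem ppA_eq (sno edges : List (List (String × List String))) (cn nn : List String)
    (h : ∀ edge ∈ edges, (edge.map Prod.fst).Nodup) :
    pre_permutation_edge_order_management sno edges cn nn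
      = (sno.flatMap (fun node => node.flatMap (fun p => ppOcc (ppCondA cn p.1) edges)))
        ++ ppOcc (ppCondT cn nn) edges := by
  unfold pre_permutation_edge_order_management
  rw [ppA_tail_fold cn nn edges h]
  congr 1
  rw [PySem.List.foldl_congr_mem _ _
      (fun acc node => acc ++ node.flatMap (fun p => ppOcc (ppCondA cn p.1) edges)) _ ?_]
  · exact PySem.List.foldl_append_eq_flatMap _ sno []
  · intro acc node _
    rw [PySem.List.foldl_congr_mem _ _
        (fun acc p => acc ++ ppOcc (ppCondA cn p.1) edges) acc ?_]
    · exact PySem.List.foldl_append_eq_flatMap _ node acc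
    · intro acc p _
      exact ppA_edges_fold cn p.1 edges h acc

-- ---- B-side characterisation ----

theorem ppBStep_getD (circuit blocked : PySem.Set String) (edge : List (String × List String))
    (st : PySem.Dict String (List (List (String × List String))) × List (List (String × List String)))
    (q : String × List String) (k : String) :
    ((ppBStep circuit blocked edge st q).1).getD k []
      = st.1.getD k [] ++ (if ppCondB circuit k q then [edge] else []) := by
  unfold ppBStep ppCondB
  simp only [ppV0, ppV1]
  split_ifs <;>
    simp_all [PySem.Dict.getD_modify] <;>
    split_ifs <;>
    simp_all

theorem ppBStep_snd (circuit blocked : PySem.Set String) (edge : List (String × List String))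
    (st : PySem.Dict String (List (List (String × List String))) × List (List (String × List String)))
    (q : String × List String) :
    (ppBStep circuit blocked edge st q).2
      = st.2 ++ (if ppCondTB circuit blocked q then [edge] else []) := by
  unfold ppBStep ppCondTB
  simp only [ppV0, ppV1]
  split_ifs <;> simp_all

theorem ppB_edge_fold_getD (circuit blocked : PySem.Set String) (edge l : List (String × List String))
    (st : PySem.Dict String (List (List (String × List String))) × List (List (String × List String)))
    (k : String) :
    ((l.foldl (ppBStep circuit blocked edge) st).1).getD k []
      = st.1.getD k [] ++ (l.filter (ppCondB circuit k)).map (fun _ => edge) := by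
  induction l generalizing st with
  | nil => simp
  | cons q rest ih =>
    rw [List.foldl_cons, ih, ppBStep_getD]
    by_cases h : ppCondB circuit k q = true <;> simp [h]

theorem ppB_edge_fold_snd (circuit blocked : PySem.Set String) (edge l : List (String × List String))
    (st : PySem.Dict String (List (List (String × List String))) × List (List (String × List String))) :
    (l.foldl (ppBStep circuit blocked edge) st).2
      = st.2 ++ (l.filter (ppCondTB circuit blocked)).map (fun _ => edge) := by
  induction l generalizing st with
  | nil => simp
  | cons q rest ih =>
    rw [List.foldl_cons, ih, ppBStep_snd]
    by_cases h : ppCondTB circuit blocked q = true <;> simp [h]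

theorem ppB_edges_fold_getD (circuit blocked : PySem.Set String)
    (edges : List (List (String × List String)))
    (st : PySem.Dict String (List (List (String × List String))) × List (List (String × List String)))
    (k : String) :
    ((edges.foldl (fun st edge => edge.foldl (ppBStep circuit blocked edge) st) st).1).getD k []
      = st.1.getD k [] ++ ppOcc (ppCondB circuit k) edges := by
  induction edges generalizing st with
  | nil => simp [ppOcc]
  | cons edge rest ih =>
    rw [List.foldl_cons, ih, ppB_edge_fold_getD]
    simp [ppOcc]

theorem ppB_edges_fold_snd (circuit blocked : PySem.Set String)
    (edges : List (List (String × List String)))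
    (st : PySem.Dict String (List (List (String × List String))) × List (List (String × List String))) :
    (edges.foldl (fun st edge => edge.foldl (ppBStep circuit blocked edge) st) st).2
      = st.2 ++ ppOcc (ppCondTB circuit blocked) edges := by
  induction edges generalizing st with
  | nil => simp [ppOcc]
  | cons edge rest ih =>
    rw [List.foldl_cons, ih, ppB_edge_fold_snd]
    simp [ppOcc]

theorem ppB_eq (sno edges : List (List (String × List String))) (cn nn : List String) :
    pre_permutation_edge_order_management_alt sno edges cn nn
      = (sno.flatMap (fun node => node.flatMap (fun p => ppOcc (ppCondA cn p.1) edges)))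
        ++ ppOcc (ppCondT cn nn) edges := by
  unfold pre_permutation_edge_order_management_alt
  simp only []
  rw [ppB_edges_fold_snd]
  have hocc : ∀ k, ppOcc (ppCondB (PySem.Set.ofList cn) k) edges = ppOcc (ppCondA cn k) edges := by
    intro k
    unfold ppOcc
    congr 1
    funext edge
    congr 1
    apply List.filter_congr
    intro q _
    exact ppCondB_eq cn k q
  have htail : ppOcc (ppCondTB (PySem.Set.ofList cn)
      (PySem.Set.union (PySem.Set.ofList cn) (PySem.Set.ofList nn))) edges
      = ppOcc (ppCondT cn nn) edges := by
    unfold ppOcc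
    congr 1
    funext edge
    congr 1
    apply List.filter_congr
    intro q _
    exact ppCondTB_eq cn nn q
  rw [htail]
  congr 1
  rw [PySem.List.foldl_congr_mem _ _
      (fun acc node => acc ++ node.flatMap (fun p => ppOcc (ppCondA cn p.1) edges)) _ ?_]
  · exact PySem.List.foldl_append_eq_flatMap _ sno []
  · intro acc node _
    rw [PySem.List.foldl_congr_mem _ _
        (fun acc p => acc ++ ppOcc (ppCondA cn p.1) edges) acc ?_]
    · exact PySem.List.foldl_append_eq_flatMap _ node acc
    · intro acc p _
      rw [ppB_edges_fold_getD, hocc]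
      simp [PySem.Dict.getD_empty]

-- ===== VERDICT (by name: the statement is the Claim_ definition above) =====
theorem pre_permutation_edge_order_management_spec : Claim_equal_pre_permutation_edge_order_management := by
  intro sno edges cn nn _hdom hpre
  unfold Spec_pre_permutation_edge_order_management
  rw [ppA_eq sno edges cn nn (fun e he => (hpre e he).1), ppB_eq]
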